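-- pv_equiv track=rewrite | github.com/LK005/mooc | Data_structure_and_algorithm/3_2.py | HTMLMatch
-- ===== SOURCE A (Python) =====
-- class Stack:
--
--     def __init__(self):
--
--         self.items = []
--
--     def isEmpty(self):
--
--         return self.items == []
--
--     def push(self, item):
--
--         self.items.append(item)
--
--     def pop(self):
--
--         return self.items.pop()
--
--     def peek(self):
--
--         return self.items[len(self.items)-1]
--
--     def size(self):
--
--         return len(self.items)
--
--     def items1(self):
--         return self.items
--
-- def HTMLMatch(s):
--     tagst = Stack()
--     i = 0
--     while i<=len(s)-1:
--         lasttag = '/'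
--         if s[i] == '<':
--             i += 1
--             if s[i] == '/':
--                 i += 1
--             else:
--                 while s[i] != '>':
--                     # tagst.push(s[i])
--                     # tagpop =
--                     lasttag += s[i]
--                     i += 1
--                 tagst.push(lasttag)
--         else:
--             i += 1
--     for i in tagst.items1():
--         if i not in s:
--             return False
--             break
--     return True
-- ===== SOURCE B (Python) =====
-- def HTMLMatch(s):
--     # Stage 1: peel the string apart with str.partition instead of scanning
--     # characters: repeatedly split at the next '<', and for an opening tag at
--     # the next '>', collecting '/' + name.
--     tags = []
--     rest = s
--     while True:
--         _, sep, rest = rest.partition('<')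
--         if not sep:
--             break
--         if not rest.startswith('/'):
--             name, _, rest = rest.partition('>')
--             tags.append('/' + name)
--     # Stage 2: group the tags by length and test each group against the set of
--     # all substrings (k-grams) of s of that length, instead of one substring
--     # scan per tag.
--     need = {}
--     for t in tags:
--         need.setdefault(len(t), set()).add(t)
--     return all(ts <= {s[j:j + k] for j in range(len(s) - k + 1)}
--                for k, ts in need.items())
-- ===== Notes on version B (the rewrite author's own statement) =====
-- stated objective: faster
-- what changed: Collection is done by repeated str.partition splitting (peel at the next '<'/'>') instead of A's per-character index walk with a Stack class, and the membership check groups the tags by length and tests each group by set inclusion against the set of all k-grams (length-k substrings) of s, replacing A's one substring scan per tag; partition/set operations run at C speed and duplicate tags are deduplicated.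
import Mathlib
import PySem

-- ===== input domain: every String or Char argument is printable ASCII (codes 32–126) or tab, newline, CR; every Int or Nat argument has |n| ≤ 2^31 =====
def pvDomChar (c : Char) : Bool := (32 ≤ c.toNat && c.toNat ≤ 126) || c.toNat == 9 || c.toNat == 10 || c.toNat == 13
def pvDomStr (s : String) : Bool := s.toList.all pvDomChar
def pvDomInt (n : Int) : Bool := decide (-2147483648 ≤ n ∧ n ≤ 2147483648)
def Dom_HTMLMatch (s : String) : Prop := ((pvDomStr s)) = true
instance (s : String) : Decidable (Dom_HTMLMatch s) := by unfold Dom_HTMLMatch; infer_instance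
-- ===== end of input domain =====

-- B collects the opening tags by repeated str.partition splitting (peel at the next '<' / '>')
-- instead of A's per-character index walk, and checks them grouped by length against the set of
-- all k-grams of s instead of one substring scan per tag (objective: alternative algorithm).

-- ===== PORT A =====
-- inner 'while s[i] != '>'' loop of A: returns (collected chars, rest starting at '>')
def pvCollectA : List Char → List Char × List Char
  | [] => ([], [])
  | c :: rest =>
    if c = '>' then ([], c :: rest)
    else
      let p := pvCollectA rest
      (c :: p.1, p.2)

theorem pvCollectA_len (l : List Char) : (pvCollectA l).2.length ≤ l.length := by
  induction l with
  | nil => simp [pvCollectA]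
  | cons c rest ih =>
    by_cases h : c = '>'
    · simp [pvCollectA, h]
    · simp [pvCollectA, h]; omega

-- outer while loop of A: walks the string, pushing '/' ++ tagname for each opening tag
def pvScanA : List Char → List (List Char) → List (List Char)
  | [], acc => acc
  | c :: rest, acc =>
    if c = '<' then
      match rest with
      | [] => acc   -- Python raises IndexError here (excluded by Pre_)
      | d :: rest2 =>
        if d = '/' then pvScanA rest2 acc
        else
          let p := pvCollectA (d :: rest2)
          pvScanA p.2 (acc ++ ['/' :: p.1])
    else pvScanA rest acc
termination_by cs _ => cs.length
decreasing_by
  · simp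
  · have := pvCollectA_len (d :: rest2); simp at this ⊢; omega
  · simp

def HTMLMatch (s : String) : Bool :=
  (pvScanA s.toList []).all (fun t => PySem.Chars.isIn t s.toList)

-- ===== PORT B =====
-- str.partition(c) for a ONE-CHARACTER separator, by hand (exact: Python splits at the first
-- occurrence of c, returning (before, c, after), or (s, '', '') when c does not occur)
def pvPartition (l : List Char) (c : Char) : List Char × List Char × List Char :=
  match l with
  | [] => ([], [], [])
  | x :: r =>
    if x = c then ([], [c], r)
    else
      let p := pvPartition r c
      (x :: p.1, p.2.1, p.2.2)

theorem pvPartition_after_le (l : List Char) (c : Char) :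
    (pvPartition l c).2.2.length ≤ l.length := by
  induction l with
  | nil => simp [pvPartition]
  | cons x r ih =>
    by_cases h : x = c
    · simp [pvPartition, h]
    · simp [pvPartition, h]; omega

theorem pvPartition_after_lt (l : List Char) (c : Char) (h : (pvPartition l c).2.1 ≠ []) :
    (pvPartition l c).2.2.length < l.length := by
  induction l with
  | nil => simp [pvPartition] at h
  | cons x r ih =>
    by_cases hx : x = c
    · simp [pvPartition, hx]
    · simp [pvPartition, hx] at h ⊢
      exact Nat.le_of_lt (ih h)

-- the 'while True: …partition…' collection loop of B, over the same tags accumulator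
def pvCollectB (rest : List Char) (tags : List (List Char)) : List (List Char) :=
  let p1 := pvPartition rest '<'
  if p1.2.1 = [] then tags
  else if PySem.Chars.startswith p1.2.2 ['/'] then pvCollectB p1.2.2 tags
  else
    let p2 := pvPartition p1.2.2 '>'
    pvCollectB p2.2.2 (tags ++ ['/' :: p2.1])
termination_by rest.length
decreasing_by
  · exact pvPartition_after_lt rest '<' (by assumption)
  · exact Nat.lt_of_le_of_lt (pvPartition_after_le _ '>') (pvPartition_after_lt rest '<' (by assumption))

-- {s[j:j+k] for j in range(len(s)-k+1)} : the set of all k-grams of s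
def pvGrams (cs : List Char) (k : Int) : PySem.Set (List Char) :=
  PySem.Set.ofList ((PySem.List.pyRange 0 ((cs.length : Int) - k + 1) 1).map
    (fun j => PySem.List.slice cs (some j) (some (j + k))))

-- the grouping loop: need.setdefault(len(t), set()).add(t)
def pvNeed (tags : List (List Char)) : PySem.Dict Int (PySem.Set (List Char)) :=
  tags.foldl (fun d t => d.modify ((t.length : Int)) PySem.Set.empty
    (fun s0 => PySem.Set.add s0 t)) PySem.Dict.empty

def HTMLMatch_alt (s : String) : Bool :=
  (pvNeed (pvCollectB s.toList [])).items.all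
    (fun p => PySem.Set.issubset p.2 (pvGrams s.toList p.1))

-- ===== PRECONDITION & SPEC =====
-- Pre_ excludes exactly the inputs on which A raises IndexError: a '<' as the last character,
-- or a '<' not followed by '/' and with no later '>'.
def Pre_HTMLMatch (s : String) : Prop :=
  ∀ i < s.toList.length, s.toList.getD i ' ' = '<' →
    i + 1 < s.toList.length ∧
    (s.toList.getD (i + 1) ' ' ≠ '/' →
      ∃ j < s.toList.length, i < j ∧ s.toList.getD j ' ' = '>')
instance (s : String) : Decidable (Pre_HTMLMatch s) := by unfold Pre_HTMLMatch; infer_instance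

def pvWitness_HTMLMatch : String := "<a></a>"

def Spec_HTMLMatch (s : String) (out : Bool) : Prop := out = HTMLMatch_alt s
instance (s : String) (out : Bool) : Decidable (Spec_HTMLMatch s out) := by unfold Spec_HTMLMatch; infer_instance

-- ===== CLAIM (what is proved, stated in full; the proofs are below) =====
def Claim_equal_HTMLMatch : Prop := ∀ (s : String), Dom_HTMLMatch s → Pre_HTMLMatch s → Spec_HTMLMatch s (HTMLMatch s)

-- ===== LEMMAS AND PROOFS =====


-- unfolding equations for pvScanA (well-founded recursion)
theorem pvScanA_nil (acc : List (List Char)) : pvScanA [] acc = acc := by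
  rw [pvScanA]

theorem pvScanA_cons_not {c : Char} (rest : List Char) (acc : List (List Char))
    (h : c ≠ '<') : pvScanA (c :: rest) acc = pvScanA rest acc := by
  rw [pvScanA.eq_def]; simp [h]

theorem pvScanA_close (rest2 : List Char) (acc : List (List Char)) :
    pvScanA ('<' :: '/' :: rest2) acc = pvScanA rest2 acc := by
  rw [pvScanA.eq_def]; simp

theorem pvScanA_open {d : Char} (rest2 : List Char) (acc : List (List Char))
    (h : d ≠ '/') : pvScanA ('<' :: d :: rest2) acc =
      pvScanA (pvCollectA (d :: rest2)).2 (acc ++ ['/' :: (pvCollectA (d :: rest2)).1]) := by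
  rw [pvScanA.eq_def]; simp [h]

-- every '<' is followed by some character, and by a later '>' unless that character is '/'
def pvGood : List Char → Bool
  | [] => true
  | c :: rest =>
    (if c = '<' then
      match rest with
      | [] => false
      | d :: _ => (d = '/' : Bool) || rest.contains '>'
     else true) && pvGood rest

theorem pvGood_tail {c : Char} {rest : List Char} (h : pvGood (c :: rest) = true) :
    pvGood rest = true := by
  unfold pvGood at h
  simp only [Bool.and_eq_true] at h
  exact h.2

theorem pvGood_suffix {l2 l1 : List Char} (h : l2 <:+ l1) (hg : pvGood l1 = true) :
    pvGood l2 = true := by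
  induction l1 with
  | nil => simpa [List.suffix_nil.mp h]
  | cons c rest ih =>
    rcases List.suffix_cons_iff.mp h with rfl | h'
    · exact hg
    · exact ih h' (pvGood_tail hg)

theorem pvCollectA_suffix (l : List Char) : (pvCollectA l).2 <:+ l := by
  induction l with
  | nil => simp [pvCollectA]
  | cons c rest ih =>
    by_cases h : c = '>'
    · simp [pvCollectA, h]
    · simpa [pvCollectA, h] using ih.trans (List.suffix_cons c rest)

theorem pvCollectA_mem {l : List Char} (h : '>' ∈ l) :
    ∃ t r, pvCollectA l = (t, '>' :: r) := by
  induction l with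
  | nil => cases h
  | cons c rest ih =>
    by_cases hc : c = '>'
    · subst hc; exact ⟨[], rest, by simp [pvCollectA]⟩
    · have hr : '>' ∈ rest := by
        rcases List.mem_cons.mp h with h1 | h1
        · exact absurd h1.symm hc
        · exact h1
      obtain ⟨t, r, ht⟩ := ih hr
      exact ⟨c :: t, r, by simp [pvCollectA, hc, ht]⟩

-- str.partition versus A's inner collection loop: when the inner loop ends at a '>',
-- partition('>') splits at exactly that '>'
theorem pvPartition_of_collectA {l t r : List Char} (h : pvCollectA l = (t, '>' :: r)) :
    pvPartition l '>' = (t, ['>'], r) := by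
  induction l generalizing t with
  | nil => simp [pvCollectA] at h
  | cons c rest ih =>
    by_cases hc : c = '>'
    · subst hc
      simp only [pvCollectA, reduceIte] at h
      obtain ⟨h1, h2⟩ := Prod.mk.inj h
      obtain rfl : rest = r := by injection h2
      subst h1
      simp [pvPartition]
    · rcases e : pvCollectA rest with ⟨t1, r1⟩
      simp only [pvCollectA, hc, reduceIte, e] at h
      obtain ⟨h1, h2⟩ := Prod.mk.inj h
      subst h1
      subst h2
      simp [pvPartition, hc, ih e]

theorem pvPartition_cons_self (c : Char) (r : List Char) :
    pvPartition (c :: r) c = ([], [c], r) := by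
  simp [pvPartition]

theorem pvPartition_cons_ne {x c : Char} (r : List Char) (h : x ≠ c) :
    pvPartition (x :: r) c =
      (x :: (pvPartition r c).1, (pvPartition r c).2.1, (pvPartition r c).2.2) := by
  simp [pvPartition, h]

theorem pvCollectB_cons_ne {c : Char} (t : List Char) (acc : List (List Char)) (h : c ≠ '<') :
    pvCollectB (c :: t) acc = pvCollectB t acc := by
  rw [pvCollectB.eq_def]
  conv_rhs => rw [pvCollectB.eq_def]
  simp only [pvPartition_cons_ne t h]

-- the two collection phases agree on every pvGood string
theorem pvMainB : ∀ (n : Nat) (cs : List Char), cs.length ≤ n → pvGood cs = true →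
    ∀ acc, pvCollectB cs acc = pvScanA cs acc := by
  intro n
  induction n with
  | zero =>
    intro cs hlen _ acc
    obtain rfl : cs = [] := List.length_eq_zero_iff.mp (Nat.le_zero.mp hlen)
    rw [pvCollectB, pvScanA_nil]
    simp [pvPartition]
  | succ n ih =>
    intro cs hlen hg acc
    cases cs with
    | nil =>
      rw [pvCollectB, pvScanA_nil]
      simp [pvPartition]
    | cons c rest =>
      have hg2 : pvGood rest = true := pvGood_tail hg
      by_cases hc : c = '<'
      · subst hc
        cases rest with
        | nil => unfold pvGood at hg; simp at hg
        | cons d rest2 =>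
          by_cases hd : d = '/'
          · subst hd
            have hrest2 : pvGood rest2 = true := pvGood_tail hg2
            have hlen2 : ('/' :: rest2).length ≤ n := by simp at hlen ⊢; omega
            rw [pvScanA_close, pvCollectB]
            simp only [pvPartition_cons_self]
            rw [if_neg (by simp), if_pos (by simp [PySem.Chars.startswith, List.isPrefixOf])]
            rw [ih ('/' :: rest2) hlen2 hg2 acc, pvScanA_cons_not rest2 acc (by decide)]
          · have hg1' : d = '/' ∨ '>' ∈ d :: rest2 := by
              unfold pvGood at hg
              simp only [Bool.and_eq_true] at hg
              simpa using hg.1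
            have hmem : '>' ∈ d :: rest2 := by
              rcases hg1' with h | h
              · exact absurd h hd
              · exact h
            obtain ⟨t, r, hcoll⟩ := pvCollectA_mem hmem
            have hsuf : ('>' :: r) <:+ (d :: rest2) := by
              simpa [hcoll] using pvCollectA_suffix (d :: rest2)
            have hrg : pvGood r = true :=
              pvGood_suffix ((List.suffix_cons '>' r).trans hsuf) hg2
            have hrlen : r.length ≤ n := by
              have := hsuf.length_le
              simp at this hlen; omega
            rw [pvScanA_open rest2 acc hd, hcoll, pvScanA_cons_not r _ (by decide)]
            rw [pvCollectB]
            simp only [pvPartition_cons_self]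
            rw [if_neg (by simp)]
            rw [if_neg (by simp [PySem.Chars.startswith, List.isPrefixOf, Ne.symm hd])]
            simp only [pvPartition_of_collectA hcoll]
            exact ih r hrlen hrg (acc ++ ['/' :: t])
      · have hlen2 : rest.length ≤ n := by simp at hlen; omega
        rw [pvScanA_cons_not rest acc hc, pvCollectB_cons_ne rest acc hc]
        exact ih rest hlen2 hg2 acc

theorem pre_imp_good_list : ∀ (L : List Char),
    (∀ i < L.length, L.getD i ' ' = '<' →
      i + 1 < L.length ∧
      (L.getD (i + 1) ' ' ≠ '/' → ∃ j < L.length, i < j ∧ L.getD j ' ' = '>')) →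
    pvGood L = true := by
  intro L
  induction L with
  | nil => intro _; rfl
  | cons c rest ih =>
    intro h
    unfold pvGood
    simp only [Bool.and_eq_true]
    constructor
    · by_cases hc : c = '<'
      · obtain ⟨h1, h2⟩ := h 0 (by simp) (by simpa using hc)
        cases rest with
        | nil => simp at h1
        | cons d rest2 =>
          simp only [hc, reduceIte]
          by_cases hd : d = '/'
          · simp [hd]
          · obtain ⟨j, hj, hj0, hjgt⟩ := h2 (by simpa using hd)
            obtain ⟨k, rfl⟩ : ∃ k, j = k + 1 := ⟨j - 1, by omega⟩
            have hk : k < (d :: rest2).length := by simp at hj ⊢; omega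
            have hkv : (d :: rest2).getD k ' ' = '>' := by simpa using hjgt
            have hjmem : '>' ∈ d :: rest2 := by
              rw [List.getD_eq_getElem _ _ hk] at hkv
              exact hkv ▸ List.getElem_mem hk
            simp [hjmem]
      · simp [hc]
    · apply ih
      intro i hi hlt
      obtain ⟨h1, h2⟩ := h (i + 1) (by simp; omega) (by simpa using hlt)
      constructor
      · simp at h1 ⊢; omega
      · intro hne
        obtain ⟨j, hj, hij, hgt⟩ := h2 (by simpa using hne)
        obtain ⟨k, rfl⟩ : ∃ k, j = k + 1 := ⟨j - 1, by omega⟩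
        exact ⟨k, by simp at hj ⊢; omega, by omega, by simpa using hgt⟩


-- getD of the grouping fold: the group at key k collects exactly the tags of length k
theorem pvNeed_getD (tags : List (List Char)) (d : PySem.Dict Int (PySem.Set (List Char)))
    (k : Int) :
    (tags.foldl (fun d t => d.modify ((t.length : Int)) PySem.Set.empty
        (fun s0 => PySem.Set.add s0 t)) d).getD k PySem.Set.empty
      = (tags.filter (fun t => ((t.length : Int) == k))).foldl PySem.Set.add
          (d.getD k PySem.Set.empty) := by
  induction tags generalizing d with
  | nil => simp
  | cons t rest ih =>
    simp only [List.foldl_cons, List.filter_cons]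
    by_cases hk : (t.length : Int) = k
    · rw [ih]
      rw [PySem.Dict.getD_modify]
      simp [hk]
    · rw [ih]
      rw [PySem.Dict.getD_modify]
      simp [hk, Ne.symm hk]

-- a tag t is in the set of |t|-grams of cs exactly when it occurs as a substring of cs
theorem mem_pvGrams_iff (t cs : List Char) :
    t ∈ pvGrams cs (t.length : Int) ↔ PySem.Chars.isIn t cs = true := by
  rw [← PySem.Chars.exists_prefix_drop_iff_isIn]
  unfold pvGrams
  rw [PySem.Set.mem_ofList]
  simp only [List.mem_map]
  constructor
  · rintro ⟨j, hj, hslice⟩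
    obtain ⟨hj0, hjlt⟩ := PySem.List.mem_pyRange_one.mp hj
    refine ⟨j.toNat, ?_⟩
    rw [PySem.List.slice_toNat cs hj0 (by omega)] at hslice
    have hlen : (j + (t.length : Int)).toNat - j.toNat = t.length := by omega
    rw [hlen] at hslice
    rw [← hslice]
    exact List.take_prefix _ _
  · rintro ⟨j, hpre⟩
    have hpre' : t <+: cs.drop (min j cs.length) := by
      rcases Nat.le_total j cs.length with h | h
      · simpa [Nat.min_eq_left h] using hpre
      · have h1 : cs.drop j = [] := List.drop_eq_nil_of_le h
        have h2 : cs.drop (min j cs.length) = [] := by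
          simp [Nat.min_eq_right h]
        rw [h2]
        rw [h1] at hpre
        exact hpre
    have hlen : min j cs.length + t.length ≤ cs.length := by
      have := hpre'.length_le
      simp only [List.length_drop] at this
      omega
    refine ⟨((min j cs.length : Nat) : Int), ?_, ?_⟩
    · rw [PySem.List.mem_pyRange_one]
      constructor
      · positivity
      · omega
    · rw [PySem.List.slice_toNat cs (by positivity) (by positivity)]
      have h1 : (((min j cs.length : Nat) : Int) + (t.length : Int)).toNat
          - ((min j cs.length : Nat) : Int).toNat = t.length := by omega
      rw [h1, Int.toNat_natCast]
      exact (List.prefix_iff_eq_take.mp hpre').symm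

-- the grouped k-gram check equals the per-tag substring check, for ANY tag list
theorem pvCheck_eq (tags : List (List Char)) (cs : List Char) :
    ((pvNeed tags).items.all (fun p => PySem.Set.issubset p.2 (pvGrams cs p.1)))
      = tags.all (fun t => PySem.Chars.isIn t cs) := by
  apply Bool.coe_iff_coe.mp
  have hnd : (pvNeed tags).keys.Nodup := by
    unfold pvNeed
    exact PySem.Dict.nodup_keys_foldl_modify_key tags (fun t => (t.length : Int))
      PySem.Set.empty (fun _ t => fun s0 => PySem.Set.add s0 t) PySem.Dict.empty
      (by simp [PySem.Dict.keys_empty])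
  have hkeys : (pvNeed tags).keys
      = PySem.Set.ofList (tags.map (fun t => (t.length : Int))) := by
    unfold pvNeed
    rw [PySem.Dict.keys_foldl_modify_key tags (fun t => (t.length : Int))
      PySem.Set.empty (fun _ t => fun s0 => PySem.Set.add s0 t) PySem.Dict.empty]
    rw [PySem.Set.ofList_eq_foldl]
    simp [PySem.Dict.keys_empty, PySem.Set.update]
  have hgetD : ∀ k : Int, (pvNeed tags).getD k PySem.Set.empty
      = PySem.Set.ofList (tags.filter (fun t => ((t.length : Int) == k))) := by
    intro k
    unfold pvNeed
    rw [pvNeed_getD, PySem.Dict.getD_empty, PySem.Set.ofList_eq_foldl]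
    rfl
  rw [PySem.Dict.items_eq_map_keys (pvNeed tags) hnd PySem.Set.empty]
  rw [List.all_map, List.all_eq_true, List.all_eq_true]
  constructor
  · intro h t ht
    have hk : (t.length : Int) ∈ (pvNeed tags).keys := by
      rw [hkeys, PySem.Set.mem_ofList]
      exact List.mem_map.mpr ⟨t, ht, rfl⟩
    have := h _ hk
    simp only [Function.comp] at this
    rw [PySem.Set.issubset_iff] at this
    have hmem : t ∈ (pvNeed tags).getD (t.length : Int) PySem.Set.empty := by
      rw [hgetD, PySem.Set.mem_ofList, List.mem_filter]
      exact ⟨ht, by simp⟩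
    exact (mem_pvGrams_iff t cs).mp (this t hmem)
  · intro h k _
    simp only [Function.comp]
    rw [PySem.Set.issubset_iff]
    intro x hx
    rw [hgetD, PySem.Set.mem_ofList, List.mem_filter] at hx
    obtain ⟨hxt, hxk⟩ := hx
    have hk : ((x.length : Int)) = k := by simpa using hxk
    rw [← hk]
    exact (mem_pvGrams_iff x cs).mpr (h x hxt)

-- ===== VERDICT (by name: the statement is the Claim_ definition above) =====
theorem HTMLMatch_spec : Claim_equal_HTMLMatch := by
  intro s _ hpre
  unfold Spec_HTMLMatch HTMLMatch HTMLMatch_alt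
  rw [pvMainB s.toList.length s.toList le_rfl (pre_imp_good_list s.toList hpre)]
  rw [pvCheck_eq]
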